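-- pv_equiv track=rewrite | github.com/pypi-data/pypi-mirror-403 | packages/operon-ai/operon_ai-0.11.0.tar.gz/operon_ai-0.11.0/examples/41_autophagy_context_pruning.py | generate_clean_context
-- ===== SOURCE A (Python) =====
-- def generate_clean_context(size_chars: int) -> str:
--     """Generate clean, useful context."""
--     useful_content = [
--         "Task: Analyze the quarterly sales data and identify trends.",
--         "Step 1: Load data from database - COMPLETED",
--         "Step 2: Clean and preprocess - COMPLETED",
--         "Step 3: Calculate aggregates - IN PROGRESS",
--         "Key finding: Q3 showed 15% growth over Q2",
--         "Key finding: Product category A outperformed B by 23%",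
--         "Recommendation: Focus marketing on category A",
--     ]
--     result = []
--     total = 0
--     i = 0
--     while total < size_chars:
--         line = useful_content[i % len(useful_content)]
--         result.append(line)
--         total += len(line)
--         i += 1
--     return "\n".join(result)
-- ===== SOURCE B (Python) =====
-- def generate_clean_context(size_chars: int) -> str:
--     """Generate clean, useful context."""
--     useful_content = [
--         "Task: Analyze the quarterly sales data and identify trends.",
--         "Step 1: Load data from database - COMPLETED",
--         "Step 2: Clean and preprocess - COMPLETED",
--         "Step 3: Calculate aggregates - IN PROGRESS",
--         "Key finding: Q3 showed 15% growth over Q2",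
--         "Key finding: Product category A outperformed B by 23%",
--         "Recommendation: Focus marketing on category A",
--     ]
--     if size_chars <= 0:
--         return ""
--     cycle_len = sum(len(line) for line in useful_content)
--     full = (size_chars - 1) // cycle_len
--     rem = size_chars - full * cycle_len
--     c = 0
--     k = 0
--     for line in useful_content:
--         k += 1
--         c += len(line)
--         if c >= rem:
--             break
--     block = "\n".join(useful_content)
--     return "\n".join([block] * full + ["\n".join(useful_content[:k])])
-- ===== Notes on version B (the rewrite author's own statement) =====
-- stated objective: faster
-- what changed: Instead of accumulating line lengths one appended line at a time until the target is reached, B computes the number of complete cycles of the content list in closed form with one floor division, scans at most one cycle of lines for the partial remainder, and builds the result by replicating the pre-joined cycle block.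
import Mathlib
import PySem

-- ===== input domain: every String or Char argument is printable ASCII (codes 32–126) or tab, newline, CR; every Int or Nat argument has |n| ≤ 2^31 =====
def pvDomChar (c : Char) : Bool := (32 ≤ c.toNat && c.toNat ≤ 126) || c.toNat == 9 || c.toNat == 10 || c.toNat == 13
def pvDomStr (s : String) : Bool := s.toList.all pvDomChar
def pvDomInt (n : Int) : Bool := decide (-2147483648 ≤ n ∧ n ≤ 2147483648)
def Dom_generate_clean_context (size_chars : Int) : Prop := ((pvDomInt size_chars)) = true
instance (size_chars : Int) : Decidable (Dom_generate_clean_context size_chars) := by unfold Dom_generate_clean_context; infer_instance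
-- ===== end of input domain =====

set_option maxRecDepth 40000
set_option maxHeartbeats 2000000


-- B replaces A's line-by-line accumulation loop with a closed-form count of complete 7-line
-- cycles (one floor division) plus a bounded scan of at most 7 lines for the partial cycle.

-- the constant list both Pythons define verbatim inside the function
def usefulContent : List String := [
  "Task: Analyze the quarterly sales data and identify trends.",
  "Step 1: Load data from database - COMPLETED",
  "Step 2: Clean and preprocess - COMPLETED",
  "Step 3: Calculate aggregates - IN PROGRESS",
  "Key finding: Q3 showed 15% growth over Q2",
  "Key finding: Product category A outperformed B by 23%",
  "Recommendation: Focus marketing on category A"]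

-- every line is non-empty (cited by gccLoop's decreasing_by)
lemma len_line_pos (i : Nat) : 1 ≤ PySem.Str.len (usefulContent.getD (i % usefulContent.length) "") := by
  have h7 : i % usefulContent.length < 7 := Nat.mod_lt _ (by decide)
  set j := i % usefulContent.length with hj
  interval_cases j <;> decide

-- ===== PORT A =====
-- the while-loop: state (result, total, i), appends useful_content[i % 7] while total < size_chars
def gccLoop (size_chars : Int) (result : List String) (total : Int) (i : Nat) : List String :=
  if h : total < size_chars then
    gccLoop size_chars (result ++ [usefulContent.getD (i % usefulContent.length) ""])
      (total + PySem.Str.len (usefulContent.getD (i % usefulContent.length) "")) (i + 1)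
  else result
termination_by (size_chars - total).toNat
decreasing_by
  have hl := len_line_pos i
  omega

def generate_clean_context (size_chars : Int) : String :=
  PySem.Str.join "\n" (gccLoop size_chars [] 0 0)

-- ===== PORT B =====
-- the bounded for-loop with break: k += 1; c += len(line); if c >= rem: break
def gccScan (ls : List String) (rem c k : Int) : Int :=
  match ls with
  | [] => k
  | l :: rest =>
      if c + PySem.Str.len l ≥ rem then k + 1
      else gccScan rest rem (c + PySem.Str.len l) (k + 1)

def generate_clean_context_alt (size_chars : Int) : String :=
  if size_chars ≤ 0 then ""
  else
    let cycle_len : Int := (usefulContent.map PySem.Str.len).sum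
    let full := PySem.Int.floordiv (size_chars - 1) cycle_len
    let rem := size_chars - full * cycle_len
    let k := gccScan usefulContent rem 0 0
    let block := PySem.Str.join "\n" usefulContent
    PySem.Str.join "\n" (List.replicate full.toNat block ++
      [PySem.Str.join "\n" (PySem.List.slice usefulContent none (some k))])

-- ===== PRECONDITION & SPEC =====
def Spec_generate_clean_context (size_chars : Int) (out : String) : Prop := out = generate_clean_context_alt size_chars
instance (size_chars : Int) (out : String) : Decidable (Spec_generate_clean_context size_chars out) := by unfold Spec_generate_clean_context; infer_instance

-- ===== CLAIM (what is proved, stated in full; the proofs are below) =====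
def Claim_equal_generate_clean_context : Prop := ∀ (size_chars : Int), Dom_generate_clean_context size_chars → Spec_generate_clean_context size_chars (generate_clean_context size_chars)

-- ===== LEMMAS AND PROOFS =====

lemma loop_stop (s : Int) (res : List String) (total : Int) (i : Nat) (h : ¬ total < s) :
    gccLoop s res total i = res := by
  rw [gccLoop]
  simp [h]

lemma stepA (s : Int) (res : List String) (total : Int) (i : Nat) (h : total < s) :
    gccLoop s res total i =
      gccLoop s (res ++ [usefulContent.getD (i % usefulContent.length) ""])
        (total + PySem.Str.len (usefulContent.getD (i % usefulContent.length) "")) (i + 1) := by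
  conv_lhs => rw [gccLoop]
  simp [h]

-- the accumulator is only appended to
lemma loop_append (n : Nat) : ∀ (s total : Int) (i : Nat) (res : List String),
    (s - total).toNat ≤ n → gccLoop s res total i = res ++ gccLoop s [] total i := by
  induction n with
  | zero =>
    intro s total i res h
    rw [loop_stop _ _ _ _ (by omega), loop_stop _ _ _ _ (by omega)]
    simp
  | succ n ih =>
    intro s total i res h
    by_cases hlt : total < s
    · have hl := len_line_pos i
      rw [stepA _ _ _ _ hlt, stepA _ [] _ _ hlt]
      rw [ih _ _ _ _ (by omega), ih _ _ (i+1) ([] ++ _) (by omega)]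
      simp
    · rw [loop_stop _ _ _ _ hlt, loop_stop _ _ _ _ hlt]
      simp

lemma loop_append' (s total : Int) (i : Nat) (res : List String) :
    gccLoop s res total i = res ++ gccLoop s [] total i :=
  loop_append (s - total).toNat s total i res le_rfl

-- the loop only reads size_chars - total
lemma loop_shift (n : Nat) : ∀ (s total d : Int) (i : Nat) (res : List String),
    (s - total).toNat ≤ n → gccLoop s res total i = gccLoop (s - d) res (total - d) i := by
  induction n with
  | zero =>
    intro s total d i res h
    rw [loop_stop _ _ _ _ (by omega), loop_stop _ _ _ _ (by omega)]
  | succ n ih =>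
    intro s total d i res h
    by_cases hlt : total < s
    · have hl := len_line_pos i
      rw [stepA _ _ _ _ hlt, stepA _ _ (total - d) _ (by omega)]
      rw [ih _ _ d _ _ (by omega)]
      ring_nf
    · rw [loop_stop _ _ _ _ hlt, loop_stop _ _ _ _ (by omega)]

-- the loop only reads i modulo 7
lemma loop_mod (n : Nat) : ∀ (s total : Int) (i : Nat) (res : List String),
    (s - total).toNat ≤ n → gccLoop s res total i = gccLoop s res total (i % 7) := by
  induction n with
  | zero =>
    intro s total i res h
    rw [loop_stop _ _ _ _ (by omega), loop_stop _ _ _ _ (by omega)]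
  | succ n ih =>
    intro s total i res h
    by_cases hlt : total < s
    · have hl := len_line_pos i
      have hL : usefulContent.length = 7 := rfl
      have hmm : i % 7 % usefulContent.length = i % usefulContent.length := by
        rw [hL]; omega
      rw [stepA _ _ _ _ hlt, stepA _ _ _ (i % 7) hlt, hmm]
      rw [ih _ _ (i + 1) _ (by omega), ih _ _ (i % 7 + 1) _ (by omega)]
      have : (i + 1) % 7 = (i % 7 + 1) % 7 := by omega
      rw [this]
    · rw [loop_stop _ _ _ _ hlt, loop_stop _ _ _ _ hlt]

-- peeling one complete cycle of 7 lines
lemma loop_cycle (s : Int) (hs : 323 < s) :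
    gccLoop s [] 0 0 = usefulContent ++ gccLoop (s - 323) [] 0 0 := by
  have g0 : usefulContent.getD (0 % usefulContent.length) "" = "Task: Analyze the quarterly sales data and identify trends." := rfl
  have g1 : usefulContent.getD (1 % usefulContent.length) "" = "Step 1: Load data from database - COMPLETED" := rfl
  have g2 : usefulContent.getD (2 % usefulContent.length) "" = "Step 2: Clean and preprocess - COMPLETED" := rfl
  have g3 : usefulContent.getD (3 % usefulContent.length) "" = "Step 3: Calculate aggregates - IN PROGRESS" := rfl
  have g4 : usefulContent.getD (4 % usefulContent.length) "" = "Key finding: Q3 showed 15% growth over Q2" := rfl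
  have g5 : usefulContent.getD (5 % usefulContent.length) "" = "Key finding: Product category A outperformed B by 23%" := rfl
  have g6 : usefulContent.getD (6 % usefulContent.length) "" = "Recommendation: Focus marketing on category A" := rfl
  have e0 : PySem.Str.len "Task: Analyze the quarterly sales data and identify trends." = 59 := by decide
  have e1 : PySem.Str.len "Step 1: Load data from database - COMPLETED" = 43 := by decide
  have e2 : PySem.Str.len "Step 2: Clean and preprocess - COMPLETED" = 40 := by decide
  have e3 : PySem.Str.len "Step 3: Calculate aggregates - IN PROGRESS" = 42 := by decide
  have e4 : PySem.Str.len "Key finding: Q3 showed 15% growth over Q2" = 41 := by decide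
  have e5 : PySem.Str.len "Key finding: Product category A outperformed B by 23%" = 53 := by decide
  have e6 : PySem.Str.len "Recommendation: Focus marketing on category A" = 45 := by decide
  rw [stepA _ _ _ _ (by omega)]
  simp only [g0, e0, List.nil_append]
  norm_num
  rw [stepA _ _ _ _ (by omega)]
  simp only [g1, e1, List.cons_append, List.nil_append]
  norm_num
  rw [stepA _ _ _ _ (by omega)]
  simp only [g2, e2, List.cons_append, List.nil_append]
  norm_num
  rw [stepA _ _ _ _ (by omega)]
  simp only [g3, e3, List.cons_append, List.nil_append]
  norm_num
  rw [stepA _ _ _ _ (by omega)]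
  simp only [g4, e4, List.cons_append, List.nil_append]
  norm_num
  rw [stepA _ _ _ _ (by omega)]
  simp only [g5, e5, List.cons_append, List.nil_append]
  norm_num
  rw [stepA _ _ _ _ (by omega)]
  simp only [g6, e6, List.cons_append, List.nil_append]
  norm_num
  rw [loop_append']
  rw [loop_mod (s - 323).toNat s 323 7 [] le_rfl]
  norm_num
  rw [loop_shift (s - 323).toNat s 323 323 0 [] le_rfl]
  norm_num
  rfl

-- A's line list is non-empty for positive targets
lemma loop_ne_nil (s : Int) (hs : 1 ≤ s) : gccLoop s [] 0 0 ≠ [] := by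
  rw [stepA _ _ _ _ (by omega), loop_append']
  simp

lemma str_join_singleton (x : String) : PySem.Str.join "\n" [x] = x :=
  String.toList_inj.mp (by simp [PySem.Str.toList_join, PySem.Chars.join_singleton])

lemma chars_join_append (sep : List Char) (as bs : List (List Char)) (ha : as ≠ []) (hb : bs ≠ []) :
    PySem.Chars.join sep (as ++ bs) = PySem.Chars.join sep as ++ sep ++ PySem.Chars.join sep bs := by
  induction as with
  | nil => exact absurd rfl ha
  | cons a as ih =>
    cases as with
    | nil =>
      cases bs with
      | nil => exact absurd rfl hb
      | cons b bs =>
        simp [PySem.Chars.join_cons_cons, PySem.Chars.join_singleton]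
    | cons a' as' =>
      have h := ih (by simp)
      simp only [List.cons_append, PySem.Chars.join_cons_cons] at *
      rw [h]
      simp [List.append_assoc]

lemma str_join_append (xs ys : List String) (hx : xs ≠ []) (hy : ys ≠ []) :
    PySem.Str.join "\n" (xs ++ ys) = PySem.Str.join "\n" xs ++ "\n" ++ PySem.Str.join "\n" ys := by
  apply String.toList_inj.mp
  simp only [String.toList_append, PySem.Str.toList_join, List.map_append]
  exact chars_join_append _ _ _ (by simpa using hx) (by simpa using hy)

lemma str_join_cons (x : String) (l : List String) (h : l ≠ []) :
    PySem.Str.join "\n" (x :: l) = x ++ "\n" ++ PySem.Str.join "\n" l := by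
  have h2 := str_join_append [x] l (by simp) h
  rw [str_join_singleton] at h2
  simpa using h2

-- B peels one replicated block for targets beyond one cycle
lemma alt_cycle (s : Int) (hs : 323 < s) :
    generate_clean_context_alt s =
      PySem.Str.join "\n" usefulContent ++ "\n" ++ generate_clean_context_alt (s - 323) := by
  have hcl : (usefulContent.map PySem.Str.len).sum = 323 := by decide
  simp only [generate_clean_context_alt, hcl]
  rw [if_neg (by omega), if_neg (by omega)]
  have hf : PySem.Int.floordiv (s - 323 - 1) 323 = PySem.Int.floordiv (s - 1) 323 - 1 := by
    rw [PySem.Int.floordiv_eq_ediv_of_pos (by norm_num), PySem.Int.floordiv_eq_ediv_of_pos (by norm_num)]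
    have : s - 323 - 1 = (s - 1) + (-1) * 323 := by ring
    rw [this, Int.add_mul_ediv_right _ _ (by norm_num)]
    omega
  have hfull1 : 1 ≤ PySem.Int.floordiv (s - 1) 323 := by
    rw [PySem.Int.le_floordiv_iff_mul_le (by norm_num)]; omega
  rw [hf]
  have hrem : s - 323 - (PySem.Int.floordiv (s - 1) 323 - 1) * 323 = s - PySem.Int.floordiv (s - 1) 323 * 323 := by ring
  rw [hrem]
  have hrep : (PySem.Int.floordiv (s - 1) 323).toNat = ((PySem.Int.floordiv (s - 1) 323 - 1).toNat) + 1 := by omega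
  rw [hrep, List.replicate_succ, List.cons_append, str_join_cons _ _ (by simp)]

-- the main induction: A = B for all positive targets
lemma mainAB (n : Nat) : ∀ (s : Int), 1 ≤ s → s.toNat ≤ n →
    generate_clean_context s = generate_clean_context_alt s := by
  induction n with
  | zero => intro s h1 h2; omega
  | succ n ih =>
    intro s h1 h2
    by_cases hs : s ≤ 323
    · -- base: at most one (partial) cycle
      have g0 : usefulContent.getD (0 % usefulContent.length) "" = "Task: Analyze the quarterly sales data and identify trends." := rfl
      have g1 : usefulContent.getD (1 % usefulContent.length) "" = "Step 1: Load data from database - COMPLETED" := rfl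
      have g2 : usefulContent.getD (2 % usefulContent.length) "" = "Step 2: Clean and preprocess - COMPLETED" := rfl
      have g3 : usefulContent.getD (3 % usefulContent.length) "" = "Step 3: Calculate aggregates - IN PROGRESS" := rfl
      have g4 : usefulContent.getD (4 % usefulContent.length) "" = "Key finding: Q3 showed 15% growth over Q2" := rfl
      have g5 : usefulContent.getD (5 % usefulContent.length) "" = "Key finding: Product category A outperformed B by 23%" := rfl
      have g6 : usefulContent.getD (6 % usefulContent.length) "" = "Recommendation: Focus marketing on category A" := rfl
      have e0 : PySem.Str.len "Task: Analyze the quarterly sales data and identify trends." = 59 := by decide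
      have e1 : PySem.Str.len "Step 1: Load data from database - COMPLETED" = 43 := by decide
      have e2 : PySem.Str.len "Step 2: Clean and preprocess - COMPLETED" = 40 := by decide
      have e3 : PySem.Str.len "Step 3: Calculate aggregates - IN PROGRESS" = 42 := by decide
      have e4 : PySem.Str.len "Key finding: Q3 showed 15% growth over Q2" = 41 := by decide
      have e5 : PySem.Str.len "Key finding: Product category A outperformed B by 23%" = 53 := by decide
      have e6 : PySem.Str.len "Recommendation: Focus marketing on category A" = 45 := by decide
      have hcl : (usefulContent.map PySem.Str.len).sum = 323 := by decide
      by_cases hc1 : s ≤ 59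
      · -- 0 < s ≤ 59: A emits 1 lines
        unfold generate_clean_context
        rw [stepA _ _ _ _ (by omega)]
        simp only [g0, e0, List.nil_append]
        norm_num
        rw [loop_stop _ _ _ _ (by omega)]
        simp only [generate_clean_context_alt]
        rw [if_neg (show ¬ s ≤ 0 by omega)]
        simp only [hcl]
        have hfull : PySem.Int.floordiv (s - 1) 323 = 0 := by
          rw [PySem.Int.floordiv_eq_iff_of_pos (by norm_num)]; omega
        simp only [hfull, usefulContent, gccScan, e0, e1, e2, e3, e4, e5, e6]
        norm_num
        rw [if_pos (by omega)]
        conv_rhs => rw [str_join_singleton]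
        congr 1
      by_cases hc2 : s ≤ 102
      · -- 59 < s ≤ 102: A emits 2 lines
        unfold generate_clean_context
        rw [stepA _ _ _ _ (by omega)]
        simp only [g0, e0, List.nil_append]
        norm_num
        rw [stepA _ _ _ _ (by omega)]
        simp only [g1, e1, List.cons_append, List.nil_append]
        norm_num
        rw [loop_stop _ _ _ _ (by omega)]
        simp only [generate_clean_context_alt]
        rw [if_neg (show ¬ s ≤ 0 by omega)]
        simp only [hcl]
        have hfull : PySem.Int.floordiv (s - 1) 323 = 0 := by
          rw [PySem.Int.floordiv_eq_iff_of_pos (by norm_num)]; omega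
        simp only [hfull, usefulContent, gccScan, e0, e1, e2, e3, e4, e5, e6]
        norm_num
        rw [if_neg (by omega)]
        rw [if_pos (by omega)]
        conv_rhs => rw [str_join_singleton]
        congr 1
      by_cases hc3 : s ≤ 142
      · -- 102 < s ≤ 142: A emits 3 lines
        unfold generate_clean_context
        rw [stepA _ _ _ _ (by omega)]
        simp only [g0, e0, List.nil_append]
        norm_num
        rw [stepA _ _ _ _ (by omega)]
        simp only [g1, e1, List.cons_append, List.nil_append]
        norm_num
        rw [stepA _ _ _ _ (by omega)]
        simp only [g2, e2, List.cons_append, List.nil_append]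
        norm_num
        rw [loop_stop _ _ _ _ (by omega)]
        simp only [generate_clean_context_alt]
        rw [if_neg (show ¬ s ≤ 0 by omega)]
        simp only [hcl]
        have hfull : PySem.Int.floordiv (s - 1) 323 = 0 := by
          rw [PySem.Int.floordiv_eq_iff_of_pos (by norm_num)]; omega
        simp only [hfull, usefulContent, gccScan, e0, e1, e2, e3, e4, e5, e6]
        norm_num
        rw [if_neg (by omega)]
        rw [if_neg (by omega)]
        rw [if_pos (by omega)]
        conv_rhs => rw [str_join_singleton]
        congr 1
      by_cases hc4 : s ≤ 184
      · -- 142 < s ≤ 184: A emits 4 lines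
        unfold generate_clean_context
        rw [stepA _ _ _ _ (by omega)]
        simp only [g0, e0, List.nil_append]
        norm_num
        rw [stepA _ _ _ _ (by omega)]
        simp only [g1, e1, List.cons_append, List.nil_append]
        norm_num
        rw [stepA _ _ _ _ (by omega)]
        simp only [g2, e2, List.cons_append, List.nil_append]
        norm_num
        rw [stepA _ _ _ _ (by omega)]
        simp only [g3, e3, List.cons_append, List.nil_append]
        norm_num
        rw [loop_stop _ _ _ _ (by omega)]
        simp only [generate_clean_context_alt]
        rw [if_neg (show ¬ s ≤ 0 by omega)]
        simp only [hcl]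
        have hfull : PySem.Int.floordiv (s - 1) 323 = 0 := by
          rw [PySem.Int.floordiv_eq_iff_of_pos (by norm_num)]; omega
        simp only [hfull, usefulContent, gccScan, e0, e1, e2, e3, e4, e5, e6]
        norm_num
        rw [if_neg (by omega)]
        rw [if_neg (by omega)]
        rw [if_neg (by omega)]
        rw [if_pos (by omega)]
        conv_rhs => rw [str_join_singleton]
        congr 1
      by_cases hc5 : s ≤ 225
      · -- 184 < s ≤ 225: A emits 5 lines
        unfold generate_clean_context
        rw [stepA _ _ _ _ (by omega)]
        simp only [g0, e0, List.nil_append]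
        norm_num
        rw [stepA _ _ _ _ (by omega)]
        simp only [g1, e1, List.cons_append, List.nil_append]
        norm_num
        rw [stepA _ _ _ _ (by omega)]
        simp only [g2, e2, List.cons_append, List.nil_append]
        norm_num
        rw [stepA _ _ _ _ (by omega)]
        simp only [g3, e3, List.cons_append, List.nil_append]
        norm_num
        rw [stepA _ _ _ _ (by omega)]
        simp only [g4, e4, List.cons_append, List.nil_append]
        norm_num
        rw [loop_stop _ _ _ _ (by omega)]
        simp only [generate_clean_context_alt]
        rw [if_neg (show ¬ s ≤ 0 by omega)]
        simp only [hcl]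
        have hfull : PySem.Int.floordiv (s - 1) 323 = 0 := by
          rw [PySem.Int.floordiv_eq_iff_of_pos (by norm_num)]; omega
        simp only [hfull, usefulContent, gccScan, e0, e1, e2, e3, e4, e5, e6]
        norm_num
        rw [if_neg (by omega)]
        rw [if_neg (by omega)]
        rw [if_neg (by omega)]
        rw [if_neg (by omega)]
        rw [if_pos (by omega)]
        conv_rhs => rw [str_join_singleton]
        congr 1
      by_cases hc6 : s ≤ 278
      · -- 225 < s ≤ 278: A emits 6 lines
        unfold generate_clean_context
        rw [stepA _ _ _ _ (by omega)]
        simp only [g0, e0, List.nil_append]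
        norm_num
        rw [stepA _ _ _ _ (by omega)]
        simp only [g1, e1, List.cons_append, List.nil_append]
        norm_num
        rw [stepA _ _ _ _ (by omega)]
        simp only [g2, e2, List.cons_append, List.nil_append]
        norm_num
        rw [stepA _ _ _ _ (by omega)]
        simp only [g3, e3, List.cons_append, List.nil_append]
        norm_num
        rw [stepA _ _ _ _ (by omega)]
        simp only [g4, e4, List.cons_append, List.nil_append]
        norm_num
        rw [stepA _ _ _ _ (by omega)]
        simp only [g5, e5, List.cons_append, List.nil_append]
        norm_num
        rw [loop_stop _ _ _ _ (by omega)]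
        simp only [generate_clean_context_alt]
        rw [if_neg (show ¬ s ≤ 0 by omega)]
        simp only [hcl]
        have hfull : PySem.Int.floordiv (s - 1) 323 = 0 := by
          rw [PySem.Int.floordiv_eq_iff_of_pos (by norm_num)]; omega
        simp only [hfull, usefulContent, gccScan, e0, e1, e2, e3, e4, e5, e6]
        norm_num
        rw [if_neg (by omega)]
        rw [if_neg (by omega)]
        rw [if_neg (by omega)]
        rw [if_neg (by omega)]
        rw [if_neg (by omega)]
        rw [if_pos (by omega)]
        conv_rhs => rw [str_join_singleton]
        congr 1
      by_cases hc7 : s ≤ 323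
      · -- 278 < s ≤ 323: A emits 7 lines
        unfold generate_clean_context
        rw [stepA _ _ _ _ (by omega)]
        simp only [g0, e0, List.nil_append]
        norm_num
        rw [stepA _ _ _ _ (by omega)]
        simp only [g1, e1, List.cons_append, List.nil_append]
        norm_num
        rw [stepA _ _ _ _ (by omega)]
        simp only [g2, e2, List.cons_append, List.nil_append]
        norm_num
        rw [stepA _ _ _ _ (by omega)]
        simp only [g3, e3, List.cons_append, List.nil_append]
        norm_num
        rw [stepA _ _ _ _ (by omega)]
        simp only [g4, e4, List.cons_append, List.nil_append]
        norm_num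
        rw [stepA _ _ _ _ (by omega)]
        simp only [g5, e5, List.cons_append, List.nil_append]
        norm_num
        rw [stepA _ _ _ _ (by omega)]
        simp only [g6, e6, List.cons_append, List.nil_append]
        norm_num
        rw [loop_stop _ _ _ _ (by omega)]
        simp only [generate_clean_context_alt]
        rw [if_neg (show ¬ s ≤ 0 by omega)]
        simp only [hcl]
        have hfull : PySem.Int.floordiv (s - 1) 323 = 0 := by
          rw [PySem.Int.floordiv_eq_iff_of_pos (by norm_num)]; omega
        simp only [hfull, usefulContent, gccScan, e0, e1, e2, e3, e4, e5, e6]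
        norm_num
        rw [if_neg (by omega)]
        rw [if_neg (by omega)]
        rw [if_neg (by omega)]
        rw [if_neg (by omega)]
        rw [if_neg (by omega)]
        rw [if_neg (by omega)]
        conv_rhs => rw [str_join_singleton]
        congr 1
      · exact absurd hs (by omega)
    · -- inductive step: peel one full cycle from both sides
      rw [alt_cycle s (by omega), ← ih (s - 323) (by omega) (by omega)]
      unfold generate_clean_context
      rw [loop_cycle s (by omega)]
      exact str_join_append _ _ (by simp [usefulContent]) (loop_ne_nil _ (by omega))

-- ===== VERDICT (by name: the statement is the Claim_ definition above) =====
theorem generate_clean_context_spec : Claim_equal_generate_clean_context := by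
  intro s _
  unfold Spec_generate_clean_context
  by_cases h1 : 1 ≤ s
  · exact mainAB s.toNat s h1 le_rfl
  · unfold generate_clean_context generate_clean_context_alt
    rw [loop_stop _ _ _ _ (by omega), if_pos (by omega)]
    decide
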